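-- pv_equiv track=rewrite | github.com/Bobslayvoodoo/Advent-of-Code | 2023/Day 13/Part 1.py | FindReflectionLP
-- ===== SOURCE A (Python) =====
-- def FindReflectionLP(line,LPCandidates):
--     NewLPCandidates = []
--     for OriginalLP in LPCandidates:
--
--         LP = OriginalLP
--         RP = LP + 1
--         Valid = True
--         while LP >= 0 and RP < len(line):
--             if line[LP] != line[RP]:
--                 Valid = False
--                 break
--
--
--             LP -= 1
--             RP += 1
--         if Valid == True and OriginalLP >= 0 and OriginalLP < len(line)-1:
--             NewLPCandidates.append(OriginalLP)
--     return NewLPCandidates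
-- ===== SOURCE B (Python) =====
-- def FindReflectionLP(line, LPCandidates):
--     n = len(line)
--     out = []
--     for c in LPCandidates:
--         if 0 <= c < n - 1:
--             m = min(c + 1, n - 1 - c)
--             ok = True
--             j = 0
--             while j < m:
--                 step = min(64, m - j)
--                 if line[c - j - step + 1:c - j + 1][::-1] != line[c + 1 + j:c + 1 + j + step]:
--                     ok = False
--                     break
--                 j += step
--             if ok:
--                 out.append(c)
--     return out
-- ===== Notes on version B (the rewrite author's own statement) =====
-- stated objective: alternative
-- what changed: B replaces A's per-candidate char-by-char two-pointer expansion loop with block-wise comparison of 64-char reversed slices (early exit on the first mismatching block), with the range test done up front instead of after the scan.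
import Mathlib
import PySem

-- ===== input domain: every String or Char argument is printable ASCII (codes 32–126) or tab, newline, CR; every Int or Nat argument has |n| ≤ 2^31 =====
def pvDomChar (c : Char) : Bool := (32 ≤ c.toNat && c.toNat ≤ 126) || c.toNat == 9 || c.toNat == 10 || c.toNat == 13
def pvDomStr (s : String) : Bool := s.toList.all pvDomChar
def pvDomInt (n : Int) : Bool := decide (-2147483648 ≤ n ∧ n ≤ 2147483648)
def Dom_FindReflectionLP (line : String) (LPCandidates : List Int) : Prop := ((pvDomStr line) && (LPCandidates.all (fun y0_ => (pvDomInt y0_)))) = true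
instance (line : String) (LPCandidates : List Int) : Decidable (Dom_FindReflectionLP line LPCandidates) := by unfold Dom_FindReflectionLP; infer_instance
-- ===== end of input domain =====

-- B checks each candidate by comparing 64-char reversed-slice blocks (early exit on a mismatching block) instead of A's char-by-char two-pointer expansion loop (objective: alternative).

-- ===== PORT A =====
-- the inner 'while LP >= 0 and RP < len(line)' loop of A; returns the final Valid
def pvLoopA (s : List Char) (LP RP : Int) : Bool :=
  if h : 0 ≤ LP ∧ RP < (s.length : Int) then
    if PySem.List.pyGet? s LP ≠ PySem.List.pyGet? s RP then false
    else pvLoopA s (LP - 1) (RP + 1)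
  else true
termination_by ((s.length : Int) - RP).toNat
decreasing_by omega

def FindReflectionLP (line : String) (LPCandidates : List Int) : List Int :=
  LPCandidates.foldl (fun acc c =>
    let valid := pvLoopA line.toList c (c + 1)
    if valid = true ∧ 0 ≤ c ∧ c < (line.toList.length : Int) - 1 then acc ++ [c] else acc) []

-- ===== PORT B =====
-- the inner 'while j < m' block-comparison loop of B; returns ok
def pvLoopB (s : List Char) (c m j : Int) : Bool :=
  if h : j < m then
    let step := min 64 (m - j)
    if (PySem.List.slice s (some (c - j - step + 1)) (some (c - j + 1))).reverse
         ≠ PySem.List.slice s (some (c + 1 + j)) (some (c + 1 + j + step)) then false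
    else pvLoopB s c m (j + step)
  else true
termination_by (m - j).toNat
decreasing_by omega

def FindReflectionLP_alt (line : String) (LPCandidates : List Int) : List Int :=
  let s := line.toList
  let n : Int := s.length
  LPCandidates.foldl (fun acc c =>
    if 0 ≤ c ∧ c < n - 1 then
      let m := min (c + 1) (n - 1 - c)
      if pvLoopB s c m 0 then acc ++ [c] else acc
    else acc) []

-- ===== PRECONDITION & SPEC =====
def Spec_FindReflectionLP (line : String) (LPCandidates : List Int) (out : List Int) : Prop := out = FindReflectionLP_alt line LPCandidates
instance (line : String) (LPCandidates : List Int) (out : List Int) : Decidable (Spec_FindReflectionLP line LPCandidates out) := by unfold Spec_FindReflectionLP; infer_instance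

-- ===== CLAIM (what is proved, stated in full; the proofs are below) =====
def Claim_equal_FindReflectionLP : Prop := ∀ (line : String) (LPCandidates : List Int), Dom_FindReflectionLP line LPCandidates → Spec_FindReflectionLP line LPCandidates (FindReflectionLP line LPCandidates)

-- ===== LEMMAS AND PROOFS =====

-- "the two lists agree on their common prefix"
def pvAgree : List Char → List Char → Bool
  | a :: xs, b :: ys => a = b && pvAgree xs ys
  | _, _ => true

theorem pvAgree_nil_left (ys : List Char) : pvAgree [] ys = true := by
  cases ys <;> rfl

theorem pvAgree_nil_right (xs : List Char) : pvAgree xs [] = true := by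
  cases xs <;> rfl

-- A's loop computes pvAgree of the reversed prefix up to LP with the suffix from RP
theorem pvLoopA_eq_agree (s : List Char) (LP RP : Int) (hRP : 0 ≤ RP) (hLR : LP < RP) :
    pvLoopA s LP RP = pvAgree ((s.take (LP + 1).toNat).reverse) (s.drop RP.toNat) := by
  rw [pvLoopA]
  split
  · rename_i h
    obtain ⟨h1, h2⟩ := h
    have hLP : LP.toNat < s.length := by omega
    have hRPn : RP.toNat < s.length := by omega
    have htake : (s.take (LP + 1).toNat).reverse
        = s[LP.toNat] :: (s.take LP.toNat).reverse := by
      have : (LP + 1).toNat = LP.toNat + 1 := by omega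
      rw [this, List.take_add_one, List.getElem?_eq_getElem hLP]
      simp
    have hdrop : s.drop RP.toNat = s[RP.toNat] :: s.drop (RP.toNat + 1) := by
      exact List.drop_eq_getElem_cons hRPn
    rw [htake, hdrop]
    rw [PySem.List.pyGet?_eq_some_getElem s h1 (by omega),
        PySem.List.pyGet?_eq_some_getElem s (show (0:Int) ≤ RP by omega) (by omega)]
    by_cases heq : s[LP.toNat] = s[RP.toNat]
    · rw [if_neg (by simp [heq])]
      rw [pvLoopA_eq_agree s (LP - 1) (RP + 1) (by omega) (by omega)]
      have e1 : (LP - 1 + 1).toNat = LP.toNat := by omega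
      have e2 : (RP + 1).toNat = RP.toNat + 1 := by omega
      rw [e1, e2]
      simp [pvAgree, heq]
    · rw [if_pos (by simpa using heq)]
      simp [pvAgree, heq]
  · rename_i h
    by_cases hLP : 0 ≤ LP
    · have : s.length ≤ RP.toNat := by omega
      rw [List.drop_eq_nil_of_le this, pvAgree_nil_right]
    · have : (LP + 1).toNat = 0 := by omega
      rw [this]
      simp [pvAgree_nil_left]
termination_by ((s.length : Int) - RP).toNat
decreasing_by omega

theorem pvAgree_eq_take (xs ys : List Char) :
    pvAgree xs ys
      = decide (xs.take (min xs.length ys.length) = ys.take (min xs.length ys.length)) := by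
  induction xs generalizing ys with
  | nil => cases ys <;> simp [pvAgree]
  | cons a xs ih =>
    cases ys with
    | nil => simp [pvAgree]
    | cons b ys =>
      simp only [pvAgree, List.length_cons]
      have hmin : min (xs.length + 1) (ys.length + 1) = min xs.length ys.length + 1 := by omega
      simp only [hmin, List.take_succ_cons, ih]
      by_cases hab : a = b <;> simp [hab]

-- per-candidate equivalence: A's expansion loop agrees with B's slice test
theorem pvCand_eq (s : List Char) (c : Int) (h0 : 0 ≤ c) (h1 : c < (s.length : Int) - 1) :
    pvLoopA s c (c + 1)
      = decide ((PySem.List.slice s (some (c + 1 - min (c + 1) ((s.length : Int) - 1 - c))) (some (c + 1))).reverse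
          = PySem.List.slice s (some (c + 1)) (some (c + 1 + min (c + 1) ((s.length : Int) - 1 - c)))) := by
  set n : Int := (s.length : Int) with hn
  set m : Int := min (c + 1) (n - 1 - c) with hm
  have hm0 : 0 ≤ m := by omega
  have hm1 : m ≤ c + 1 := by simp [hm]
  have hm2 : c + 1 + m ≤ n := by omega
  rw [pvLoopA_eq_agree s c (c + 1) (by omega) (by omega), pvAgree_eq_take]
  have hmin : min (s.take (c + 1).toNat).reverse.length (s.drop (c + 1).toNat).length
      = m.toNat := by
    rw [List.length_reverse, List.length_take, List.length_drop]; omega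
  rw [hmin]
  simp only [PySem.List.slice_toNat s (a := c + 1 - m) (b := c + 1) (by omega) (by omega),
             PySem.List.slice_toNat s (a := c + 1) (b := c + 1 + m) (by omega) (by omega)]
  have e1 : (c + 1).toNat - (c + 1 - m).toNat = m.toNat := by omega
  have e2 : (c + 1 + m).toNat - (c + 1).toNat = m.toNat := by omega
  have hleft : (List.take (c + 1).toNat s).reverse.take m.toNat
      = (List.take m.toNat (List.drop ((c + 1) - m).toNat s)).reverse := by
    rw [List.take_reverse]
    have h3 : (List.take (c + 1).toNat s).length - m.toNat = ((c + 1) - m).toNat := by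
      rw [List.length_take]; omega
    rw [h3, List.drop_take]
    have h4 : (c + 1).toNat - ((c + 1) - m).toNat = m.toNat := by omega
    rw [h4]
  simp only [e1, e2, hleft]

-- slice algebra helpers
theorem pvSliceLen (s : List Char) (a b : Int) (h0 : 0 ≤ a) (hab : a ≤ b)
    (hb : b ≤ (s.length : Int)) :
    (PySem.List.slice s (some a) (some b)).length = (b - a).toNat := by
  rw [PySem.List.slice_toNat s h0 (by omega), List.length_take, List.length_drop]
  omega

theorem pvSliceSplit (s : List Char) (a b d : Int) (h0 : 0 ≤ a) (hab : a ≤ b) (hbd : b ≤ d) :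
    PySem.List.slice s (some a) (some d)
      = PySem.List.slice s (some a) (some b) ++ PySem.List.slice s (some b) (some d) := by
  rw [PySem.List.slice_toNat s h0 (by omega), PySem.List.slice_toNat s h0 (by omega),
      PySem.List.slice_toNat s (show (0:Int) ≤ b by omega) (by omega)]
  have e : d.toNat - a.toNat = (b.toNat - a.toNat) + (d.toNat - b.toNat) := by omega
  rw [e, List.take_add]
  congr 1
  have e2 : a.toNat + (b.toNat - a.toNat) = b.toNat := by omega
  rw [List.drop_drop, e2]

-- B's block loop, from offset j on, decides equality of the remaining slices
theorem pvLoopB_eq (s : List Char) (c m j : Int) (hj0 : 0 ≤ j) (hjm : j ≤ m)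
    (hmc : m ≤ c + 1) (hcm : c + 1 + m ≤ (s.length : Int)) :
    pvLoopB s c m j
      = decide ((PySem.List.slice s (some (c + 1 - m)) (some (c + 1 - j))).reverse
          = PySem.List.slice s (some (c + 1 + j)) (some (c + 1 + m))) := by
  rw [pvLoopB]
  split
  · rename_i hlt
    simp only []
    set step : Int := min 64 (m - j) with hstep
    have hs1 : 1 ≤ step := by omega
    have hs2 : j + step ≤ m := by omega
    have eL1 : c - j - step + 1 = c + 1 - j - step := by ring
    have eL2 : c - j + 1 = c + 1 - j := by ring
    have hsplitL : PySem.List.slice s (some (c + 1 - m)) (some (c + 1 - j))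
        = PySem.List.slice s (some (c + 1 - m)) (some (c + 1 - j - step))
          ++ PySem.List.slice s (some (c + 1 - j - step)) (some (c + 1 - j)) := by
      exact pvSliceSplit s _ _ _ (by omega) (by omega) (by omega)
    have hsplitR : PySem.List.slice s (some (c + 1 + j)) (some (c + 1 + m))
        = PySem.List.slice s (some (c + 1 + j)) (some (c + 1 + j + step))
          ++ PySem.List.slice s (some (c + 1 + j + step)) (some (c + 1 + m)) := by
      exact pvSliceSplit s _ _ _ (by omega) (by omega) (by omega)
    have hlen : (PySem.List.slice s (some (c + 1 - j - step)) (some (c + 1 - j))).reverse.length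
        = (PySem.List.slice s (some (c + 1 + j)) (some (c + 1 + j + step))).length := by
      rw [List.length_reverse, pvSliceLen s _ _ (by omega) (by omega) (by omega),
          pvSliceLen s _ _ (by omega) (by omega) (by omega)]
      omega
    have hiff : ((PySem.List.slice s (some (c + 1 - m)) (some (c + 1 - j))).reverse
          = PySem.List.slice s (some (c + 1 + j)) (some (c + 1 + m)))
        ↔ ((PySem.List.slice s (some (c + 1 - j - step)) (some (c + 1 - j))).reverse
              = PySem.List.slice s (some (c + 1 + j)) (some (c + 1 + j + step))
            ∧ (PySem.List.slice s (some (c + 1 - m)) (some (c + 1 - j - step))).reverse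
              = PySem.List.slice s (some (c + 1 + j + step)) (some (c + 1 + m))) := by
      rw [hsplitL, hsplitR, List.reverse_append]
      exact ⟨fun h => List.append_inj h hlen, fun ⟨h1, h2⟩ => by rw [h1, h2]⟩
    rw [eL1, eL2]
    by_cases hch : (PySem.List.slice s (some (c + 1 - j - step)) (some (c + 1 - j))).reverse
        = PySem.List.slice s (some (c + 1 + j)) (some (c + 1 + j + step))
    · rw [if_neg (not_not_intro hch)]
      rw [pvLoopB_eq s c m (j + step) (by omega) (by omega) hmc hcm]
      have e3 : c + 1 - (j + step) = c + 1 - j - step := by ring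
      have e4 : c + 1 + (j + step) = c + 1 + j + step := by ring
      rw [e3, e4]
      simp [hiff, hch]
    · rw [if_pos hch]
      simp [hiff, hch]
  · rename_i hge
    have hj : j = m := by omega
    rw [hj]
    have h1 : PySem.List.slice s (some (c + 1 - m)) (some (c + 1 - m)) = ([] : List Char) := by
      rw [PySem.List.slice_toNat s (show (0:Int) ≤ c + 1 - m by omega) (by omega)]
      simp
    have h2 : PySem.List.slice s (some (c + 1 + m)) (some (c + 1 + m)) = ([] : List Char) := by
      rw [PySem.List.slice_toNat s (show (0:Int) ≤ c + 1 + m by omega) (by omega)]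
      simp
    rw [h1, h2]
    simp
termination_by (m - j).toNat
decreasing_by omega

-- one fold step of A equals one fold step of B
theorem pvStep_eq (s : List Char) (acc : List Int) (c : Int) :
    (if pvLoopA s c (c + 1) = true ∧ 0 ≤ c ∧ c < (s.length : Int) - 1 then acc ++ [c] else acc)
    = (if 0 ≤ c ∧ c < (s.length : Int) - 1 then
        if pvLoopB s c (min (c + 1) ((s.length : Int) - 1 - c)) 0 = true then acc ++ [c]
        else acc
      else acc) := by
  by_cases hr : 0 ≤ c ∧ c < (s.length : Int) - 1
  · rw [if_pos hr]
    have hAB : pvLoopA s c (c + 1) = pvLoopB s c (min (c + 1) ((s.length : Int) - 1 - c)) 0 := by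
      rw [pvCand_eq s c hr.1 hr.2,
          pvLoopB_eq s c (min (c + 1) ((s.length : Int) - 1 - c)) 0 le_rfl (by omega)
            (by omega) (by omega)]
      have e1 : c + 1 - (0:Int) = c + 1 := by ring
      have e2 : c + 1 + (0:Int) = c + 1 := by ring
      rw [e1, e2]
    by_cases hv : pvLoopB s c (min (c + 1) ((s.length : Int) - 1 - c)) 0 = true
    · rw [if_pos hv, if_pos ⟨hAB.trans hv, hr.1, hr.2⟩]
    · rw [if_neg hv, if_neg (fun hcon => hv (hAB.symm.trans hcon.1))]
  · rw [if_neg (fun hcon => hr ⟨hcon.2.1, hcon.2.2⟩), if_neg hr]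

-- both folds agree
theorem pvFold_eq (s : List Char) (cs : List Int) (acc : List Int) :
    cs.foldl (fun acc c =>
      let valid := pvLoopA s c (c + 1)
      if valid = true ∧ 0 ≤ c ∧ c < (s.length : Int) - 1 then acc ++ [c] else acc) acc
    = cs.foldl (fun acc c =>
      if 0 ≤ c ∧ c < (s.length : Int) - 1 then
        let m := min (c + 1) ((s.length : Int) - 1 - c)
        if pvLoopB s c m 0 = true then acc ++ [c] else acc
      else acc) acc := by
  induction cs generalizing acc with
  | nil => rfl
  | cons c cs ih =>
    simp only [List.foldl_cons]
    rw [ih]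
    congr 1
    exact pvStep_eq s acc c

-- ===== VERDICT (by name: the statement is the Claim_ definition above) =====
theorem FindReflectionLP_spec : Claim_equal_FindReflectionLP := by
  intro line cs _
  unfold Spec_FindReflectionLP FindReflectionLP FindReflectionLP_alt
  exact pvFold_eq line.toList cs []
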